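-- pv_equiv track=rewrite | github.com/AlexSafatli/interview-prep | HackerRank/Python/common.py | cols_are_magic
-- ===== SOURCE A (Python) =====
-- def cols_are_magic(sq: list, c: int) -> bool:
--     for i in range(len(sq)):
--         s = 0
--         for j in range(len(sq)):
--             s += sq[j][i]
--         if s != c:
--             return False
--     return True
-- ===== SOURCE B (Python) =====
-- def cols_are_magic(sq: list, c: int) -> bool:
--     n = len(sq)
--     sums = [0] * n
--     for row in sq:
--         for i, x in enumerate(row[:n]):
--             sums[i] += x
--     return all(s == c for s in sums)
-- ===== Notes on version B (the rewrite author's own statement) =====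
-- stated objective: alternative
-- what changed: Column-major per-column summation with early return is replaced by a single row-major pass that accumulates all column sums in an array (adding only the entries a row actually has), followed by one check that every sum equals c.
import Mathlib
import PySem

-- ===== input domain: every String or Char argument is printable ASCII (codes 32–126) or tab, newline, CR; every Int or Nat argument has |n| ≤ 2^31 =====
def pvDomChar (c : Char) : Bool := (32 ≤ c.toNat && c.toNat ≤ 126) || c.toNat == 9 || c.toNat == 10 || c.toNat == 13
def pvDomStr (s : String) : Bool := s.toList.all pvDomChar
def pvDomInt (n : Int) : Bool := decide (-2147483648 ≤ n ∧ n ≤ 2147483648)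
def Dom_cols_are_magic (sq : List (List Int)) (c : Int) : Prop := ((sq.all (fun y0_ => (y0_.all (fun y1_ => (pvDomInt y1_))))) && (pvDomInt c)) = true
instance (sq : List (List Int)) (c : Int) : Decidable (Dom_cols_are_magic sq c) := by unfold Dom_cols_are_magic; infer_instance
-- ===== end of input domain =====

-- B replaces A's column-major per-column summation (with early return) by one row-major
-- accumulating pass over an array of partial column sums; same cost, different traversal.
-- Pre_ excludes exactly the ragged grids on which A raises IndexError (a row shorter than
-- len(sq) is reached before any full column with sum ≠ c); on every input A returns, B agrees.


-- ===== PORT A =====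
-- inner loop: s = 0; for j in range(len(sq)): s += sq[j][i]   (indices in range under Pre_:
-- on inputs A returns on, every access this loop reaches is valid, so the defaults are inert)
def aColSum (sq : List (List Int)) (i : Int) : Int :=
  (PySem.List.pyRange 0 sq.length 1).foldl
    (fun s j => s + PySem.List.pyGetD (PySem.List.pyGetD sq j []) i 0) 0

-- outer loop with early 'return False'
def aLoop (sq : List (List Int)) (c : Int) : List Int → Bool
  | [] => true
  | i :: rest => if aColSum sq i ≠ c then false else aLoop sq c rest

def cols_are_magic (sq : List (List Int)) (c : Int) : Bool :=
  aLoop sq c (PySem.List.pyRange 0 sq.length 1)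

-- ===== PORT B =====
-- inner loop: for i, x in enumerate(row[:n]): sums[i] += x
def bAddRow (n : Nat) (sums row : List Int) : List Int :=
  (row.take n).zipIdx.foldl (fun ss p => ss.set p.2 (ss.getD p.2 0 + p.1)) sums

def cols_are_magic_alt (sq : List (List Int)) (c : Int) : Bool :=
  let n := sq.length
  (sq.foldl (fun ss row => bAddRow n ss row) (List.replicate n 0)).all (fun s => s == c)

-- ===== PRECONDITION & SPEC =====
-- the i-th column sum (missing entries count 0; under the guards below every entry exists)
def csum (sq : List (List Int)) (i : Nat) : Int :=
  sq.foldl (fun s row => s + row.getD i 0) 0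

-- Pre_ is exactly the set of inputs Python A returns on: either the grid has no row shorter
-- than len(sq), or some fully-present column sums to a value ≠ c (A returns False there
-- before its column-major scan can hit a too-short row and raise IndexError).
def Pre_cols_are_magic (sq : List (List Int)) (c : Int) : Prop :=
  (∀ row ∈ sq, sq.length ≤ row.length) ∨
    (∃ i < sq.length, (∀ row ∈ sq, i < row.length) ∧ csum sq i ≠ c)
instance (sq : List (List Int)) (c : Int) : Decidable (Pre_cols_are_magic sq c) := by
  unfold Pre_cols_are_magic; infer_instance
def pvWitness_cols_are_magic : List (List Int) × Int := ([[1, 1], [1, 1]], 2)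

def Spec_cols_are_magic (sq : List (List Int)) (c : Int) (out : Bool) : Prop := out = cols_are_magic_alt sq c
instance (sq : List (List Int)) (c : Int) (out : Bool) : Decidable (Spec_cols_are_magic sq c out) := by unfold Spec_cols_are_magic; infer_instance

-- ===== CLAIM (what is proved, stated in full; the proofs are below) =====
def Claim_equal_cols_are_magic : Prop := ∀ (sq : List (List Int)) (c : Int), Dom_cols_are_magic sq c → Pre_cols_are_magic sq c → Spec_cols_are_magic sq c (cols_are_magic sq c)

-- ===== LEMMAS AND PROOFS =====

theorem foldl_add_init (f : List Int → Int) (l : List (List Int)) (a : Int) :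
    l.foldl (fun s x => s + f x) a = a + l.foldl (fun s x => s + f x) 0 := by
  induction l generalizing a with
  | nil => simp
  | cons x xs ih => simp only [List.foldl_cons]; rw [ih (a + f x), ih (0 + f x)]; ring

theorem csum_cons (row : List Int) (rest : List (List Int)) (i : Nat) :
    csum (row :: rest) i = row.getD i 0 + csum rest i := by
  simp only [csum, List.foldl_cons, Int.zero_add]
  exact foldl_add_init (fun r => r.getD i 0) rest (row.getD i 0)

theorem aColSum_eq (sq : List (List Int)) (i : Nat) :
    aColSum sq (i : Int) = csum sq i := by
  unfold aColSum csum
  rw [PySem.List.foldl_pyRange_zero_pyGetD' sq []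
    (fun s row => s + PySem.List.pyGetD row (i : Int) 0) 0]
  simp [PySem.List.pyGetD_natCast]

theorem aLoop_eq (sq : List (List Int)) (c : Int) (l : List Nat) :
    aLoop sq c (List.map Nat.cast l) = l.all (fun i => csum sq i == c) := by
  induction l with
  | nil => rfl
  | cons i rest ih =>
    rw [List.map_cons]
    simp only [aLoop]
    rw [aColSum_eq, ih, List.all_cons]
    by_cases h : csum sq i = c <;> simp [h]

theorem cols_are_magic_eq (sq : List (List Int)) (c : Int) :
    cols_are_magic sq c = (List.range sq.length).all (fun i => csum sq i == c) := by
  unfold cols_are_magic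
  rw [PySem.List.pyRange_zero_nat sq.length]
  exact aLoop_eq sq c (List.range sq.length)

-- B-side: sizes and values of the accumulated sums
theorem foldl_set_length (l : List (Int × Nat)) (sums : List Int) :
    (l.foldl (fun ss p => ss.set p.2 (ss.getD p.2 0 + p.1)) sums).length = sums.length := by
  induction l generalizing sums with
  | nil => rfl
  | cons q l ih => simp only [List.foldl_cons]; rw [ih]; simp

theorem bAddRow_length (n : Nat) (sums row : List Int) :
    (bAddRow n sums row).length = sums.length :=
  foldl_set_length _ sums

theorem addPrefix_getD (xs : List Int) (k : Nat) (ss : List Int) (i : Nat) :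
    ((xs.zipIdx k).foldl (fun ss p => ss.set p.2 (ss.getD p.2 0 + p.1)) ss).getD i 0 =
      if k ≤ i ∧ i - k < xs.length ∧ i < ss.length then ss.getD i 0 + xs.getD (i - k) 0
      else ss.getD i 0 := by
  induction xs generalizing k ss with
  | nil => simp
  | cons x xs ih =>
    rw [List.zipIdx_cons, List.foldl_cons]
    rw [ih (k + 1) (ss.set k (ss.getD k 0 + x))]
    have hslen : (ss.set k (ss.getD k 0 + x)).length = ss.length := by simp
    by_cases hik : i = k
    · subst hik
      by_cases hin : i < ss.length
      · have h1 : ¬ (i + 1 ≤ i) := by omega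
        rw [if_neg (by omega), if_pos ⟨Nat.le_refl i, by simp; omega⟩]
        rw [List.getD_eq_getElem?_getD (l := ss.set i (ss.getD i 0 + x)),
          List.getElem?_set_self (by omega), Option.getD_some]
        simp
      · rw [if_neg (by omega), if_neg (by omega)]
        rw [List.set_eq_of_length_le (by omega)]
    · have hgd : (ss.set k (ss.getD k 0 + x)).getD i 0 = ss.getD i 0 := by
        rw [List.getD_eq_getElem?_getD (l := ss.set k (ss.getD k 0 + x)),
          List.getElem?_set_ne (by omega), ← List.getD_eq_getElem?_getD]
      rw [hgd, hslen]
      by_cases hc : k + 1 ≤ i ∧ i - (k + 1) < xs.length ∧ i < ss.length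
      · rw [if_pos hc, if_pos (by simp only [List.length_cons]; omega)]
        have hsplit : i - k = (i - (k + 1)) + 1 := by omega
        rw [hsplit, List.getD_cons_succ]
      · rw [if_neg hc, if_neg (by simp only [List.length_cons]; omega)]

theorem bAddRow_getD (n : Nat) (sums row : List Int) (i : Nat)
    (hi : i < n) (hn : n ≤ sums.length) :
    (bAddRow n sums row).getD i 0 = sums.getD i 0 + row.getD i 0 := by
  unfold bAddRow
  rw [addPrefix_getD (row.take n) 0 sums i]
  simp only [Nat.sub_zero, List.length_take]
  by_cases hlt : i < Min.min n row.length
  · rw [if_pos ⟨Nat.zero_le i, hlt, by omega⟩]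
    have h1 : i < row.length := by omega
    rw [List.getD_eq_getElem?_getD (l := row), List.getD_eq_getElem?_getD (l := row.take n),
      List.getElem?_take_of_lt hi, List.getElem?_eq_getElem h1]
  · have hrl : row.length ≤ i := by omega
    rw [if_neg (by omega), List.getD_eq_getElem?_getD (l := row),
      List.getElem?_eq_none (by omega)]
    simp

theorem foldl_sums_getD (sq : List (List Int)) (n : Nat) (init : List Int) (i : Nat)
    (hi : i < n) (hn : n ≤ init.length) :
    (sq.foldl (fun ss row => bAddRow n ss row) init).getD i 0 = init.getD i 0 + csum sq i := by
  induction sq generalizing init with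
  | nil => simp [csum]
  | cons row rest ih =>
    simp only [List.foldl_cons]
    rw [ih (bAddRow n init row) (by rw [bAddRow_length]; omega),
      bAddRow_getD n init row i hi hn, csum_cons]
    ring

theorem foldl_sums_length (sq : List (List Int)) (n : Nat) (init : List Int) :
    (sq.foldl (fun ss row => bAddRow n ss row) init).length = init.length := by
  induction sq generalizing init with
  | nil => rfl
  | cons row rest ih => simp only [List.foldl_cons]; rw [ih, bAddRow_length]

theorem alt_eq (sq : List (List Int)) (c : Int) :
    cols_are_magic_alt sq c = (List.range sq.length).all (fun i => csum sq i == c) := by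
  simp only [cols_are_magic_alt]
  have hfin : sq.foldl (fun ss row => bAddRow sq.length ss row) (List.replicate sq.length 0)
      = (List.range sq.length).map (fun i => csum sq i) := by
    apply List.ext_getElem
    · rw [foldl_sums_length]; simp
    · intro i h1 h2
      have hi : i < sq.length := by simpa using h2
      have := foldl_sums_getD sq sq.length (List.replicate sq.length 0) i hi (by simp)
      rw [List.getD_eq_getElem?_getD, List.getElem?_eq_getElem h1, Option.getD_some,
        List.getD_eq_getElem?_getD, List.getElem?_eq_getElem (by simp [hi]), Option.getD_some]
        at this
      simp only [List.getElem_replicate] at this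
      simp [this]
  rw [hfin, List.all_map]
  rfl

-- ===== VERDICT (by name: the statement is the Claim_ definition above) =====
theorem cols_are_magic_spec : Claim_equal_cols_are_magic := by
  intro sq c _ _
  unfold Spec_cols_are_magic
  rw [cols_are_magic_eq, alt_eq]
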